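-- pv_equiv track=rewrite | github.com/bokong8119/Satanic_Yoke_core | 撒旦推杆（Satanic Yoke）核心加密程序.py | change_encrypt
-- ===== SOURCE A (Python) =====
-- def change_encrypt(answer,key):  #换位加密
--     temp=['' for k in range(len(answer))]
--     for i in range(len(answer)):
--         index_temp=(i+key)%len(answer)
--         temp[index_temp]=answer[i]
--     output_temp=''
--     for st in temp:   #列表元素整合
--         output_temp+=st
--     return output_temp
-- ===== SOURCE B (Python) =====
-- def change_encrypt(answer, key):
--     if not answer:
--         return answer
--     s = (-key) % len(answer)
--     return answer[s:] + answer[:s]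
-- ===== Notes on version B (the rewrite author's own statement) =====
-- stated objective: simpler
-- what changed: Recognizes the index-shuffling loop as a right rotation and returns the two slices answer[(-key)%n:] + answer[:(-key)%n] instead of filling a temp list position by position and concatenating it character by character.
import Mathlib
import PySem

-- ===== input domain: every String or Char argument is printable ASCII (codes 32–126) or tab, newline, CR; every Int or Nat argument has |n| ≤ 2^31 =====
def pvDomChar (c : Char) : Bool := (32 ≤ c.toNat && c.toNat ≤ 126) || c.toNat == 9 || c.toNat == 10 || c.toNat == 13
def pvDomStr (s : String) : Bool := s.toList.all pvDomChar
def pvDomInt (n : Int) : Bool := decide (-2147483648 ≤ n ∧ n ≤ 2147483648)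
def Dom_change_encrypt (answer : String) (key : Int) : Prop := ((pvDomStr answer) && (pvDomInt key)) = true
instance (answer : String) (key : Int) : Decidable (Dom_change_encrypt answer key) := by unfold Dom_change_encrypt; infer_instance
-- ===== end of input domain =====

-- B replaces A's write-into-a-temp-list positional loop by the equivalent right rotation
-- answer[(-key)%n:] + answer[:(-key)%n] (objective: simpler; return-value equivalence).

-- ===== PORT A =====
def change_encrypt (answer : String) (key : Int) : String :=
  let cs := answer.toList
  let n : Int := (cs.length : Int)
  let temp0 : List String := (List.range cs.length).map (fun _ => "")
  let temp := (PySem.List.enumerate cs 0).foldl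
      (fun t ic => PySem.List.pySetD t (PySem.Int.mod (ic.1 + key) n) (String.ofList [ic.2])) temp0
  temp.foldl (fun acc st => acc ++ st) ""

-- ===== PORT B =====
def change_encrypt_alt (answer : String) (key : Int) : String :=
  if answer = "" then answer
  else
    let n : Int := (answer.toList.length : Int)
    let s := PySem.Int.mod (-key) n
    PySem.Str.slice answer (some s) none ++ PySem.Str.slice answer none (some s)

-- ===== PRECONDITION & SPEC =====
def Spec_change_encrypt (answer : String) (key : Int) (out : String) : Prop := out = change_encrypt_alt answer key
instance (answer : String) (key : Int) (out : String) : Decidable (Spec_change_encrypt answer key out) := by unfold Spec_change_encrypt; infer_instance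

-- ===== CLAIM (what is proved, stated in full; the proofs are below) =====
def Claim_equal_change_encrypt : Prop := ∀ (answer : String) (key : Int), Dom_change_encrypt answer key → Spec_change_encrypt answer key (change_encrypt answer key)

-- ===== LEMMAS AND PROOFS =====

theorem foldl_set_length {α β : Type} (g : β → Nat) (v : β → α)
    (ps : List β) (t : List α) :
    (ps.foldl (fun t p => t.set (g p) (v p)) t).length = t.length := by
  induction ps generalizing t with
  | nil => rfl
  | cons p ps ih => simp [List.foldl_cons, ih]

theorem foldl_set_get_not_mem {α β : Type} (g : β → Nat) (v : β → α)
    (ps : List β) (t : List α) (j : Nat) :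
    j ∉ ps.map g → (ps.foldl (fun t p => t.set (g p) (v p)) t)[j]? = t[j]? := by
  induction ps generalizing t with
  | nil => intro _; rfl
  | cons p ps ih =>
      intro hj
      simp only [List.map_cons, List.mem_cons, not_or] at hj
      rw [List.foldl_cons, ih _ hj.2, List.getElem?_set_ne (by omega)]

theorem foldl_set_get_mem {α β : Type} (g : β → Nat) (v : β → α)
    (ps : List β) (p : β) (hp : p ∈ ps) (hnd : (ps.map g).Nodup) :
    ∀ (t : List α), g p < t.length →
      (ps.foldl (fun t q => t.set (g q) (v q)) t)[g p]? = some (v p) := by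
  induction ps with
  | nil => cases hp
  | cons q ps ih =>
      intro t hlt
      simp only [List.map_cons, List.nodup_cons] at hnd
      rcases List.mem_cons.mp hp with rfl | hp'
      · rw [List.foldl_cons, foldl_set_get_not_mem g v ps _ _ hnd.1,
          List.getElem?_set_self (by simpa using hlt)]
      · rw [List.foldl_cons]
        exact ih hp' hnd.2 _ (by simpa using hlt)

theorem rot_getElem? (cs : List Char) (s' j : Nat) (hs : s' ≤ cs.length) (hj : j < cs.length) :
    (cs.drop s' ++ cs.take s')[j]? = cs[(j + s') % cs.length]? := by
  rcases Nat.lt_or_ge j (cs.length - s') with hcase | hcase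
  · rw [List.getElem?_append_left (by simp only [List.length_drop]; omega),
      List.getElem?_drop]
    congr 1
    rw [Nat.mod_eq_of_lt (by omega)]
    omega
  · rw [List.getElem?_append_right (by simp only [List.length_drop]; omega)]
    simp only [List.length_drop]
    rw [List.getElem?_take_of_lt (by omega)]
    congr 1
    rw [Nat.mod_eq_sub_mod (by omega), Nat.mod_eq_of_lt (by omega)]
    omega

theorem temp_eq (cs : List Char) (key : Int) (h : cs ≠ []) :
    (PySem.List.enumerate cs 0).foldl
      (fun t ic => PySem.List.pySetD t (PySem.Int.mod (ic.1 + key) (cs.length : Int)) (String.ofList [ic.2]))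
      ((List.range cs.length).map (fun _ => ""))
    = (cs.drop ((-key) % (cs.length : Int)).toNat ++ cs.take ((-key) % (cs.length : Int)).toNat).map
        (fun c => String.ofList [c]) := by
  have hn : 0 < (cs.length : Int) := by
    have := List.length_pos_iff.mpr h
    exact_mod_cast this
  set n : Int := (cs.length : Int) with hndef
  have hfun : (fun (t : List String) (ic : Int × Char) =>
        PySem.List.pySetD t (PySem.Int.mod (ic.1 + key) n) (String.ofList [ic.2]))
      = (fun t ic => t.set (((ic.1 + key) % n).toNat) (String.ofList [ic.2])) := by
    funext t ic
    rw [PySem.Int.mod_eq_emod_of_pos hn]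
    exact PySem.List.pySetD_of_nonneg t _ (Int.emod_nonneg _ (by omega : n ≠ 0))
  rw [hfun]
  set s' : Nat := ((-key) % n).toNat with hs'def
  have hsnn : 0 ≤ (-key) % n := Int.emod_nonneg _ (by omega)
  have hslt : (-key) % n < n := Int.emod_lt_of_pos _ hn
  have hs'lt : s' < cs.length := by omega
  -- the written indices are pairwise distinct
  have hnd : ((PySem.List.enumerate cs 0).map
      (fun ic : Int × Char => ((ic.1 + key) % n).toNat)).Nodup := by
    have hmm : ((PySem.List.enumerate cs 0).map
        (fun ic : Int × Char => ((ic.1 + key) % n).toNat))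
        = ((PySem.List.enumerate cs 0).map (fun x => x.1)).map
            (fun x : Int => ((x + key) % n).toNat) := by
      rw [List.map_map]; rfl
    rw [hmm, PySem.List.map_fst_enumerate]
    apply List.Nodup.map_on _ (PySem.List.nodup_pyRange_one _ _)
    intro x hx y hy hxy
    rw [PySem.List.mem_pyRange_one] at hx hy
    have hx' := Int.emod_nonneg (x + key) (by omega : n ≠ 0)
    have hy' := Int.emod_nonneg (y + key) (by omega : n ≠ 0)
    have heq : (x + key) % n = (y + key) % n := by omega
    rw [Int.emod_eq_emod_iff_emod_sub_eq_zero] at heq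
    have hdvd : n ∣ (x + key - (y + key)) := Int.dvd_of_emod_eq_zero heq
    have hxy' : x + key - (y + key) = x - y := by ring
    rw [hxy'] at hdvd
    have : x - y = 0 := Int.eq_zero_of_abs_lt_dvd hdvd (by rw [abs_lt]; constructor <;> omega)
    omega
  apply List.ext_getElem?
  intro j
  by_cases hj : j < cs.length
  · -- the pair that writes index j is (k0, cs[k0]) with k0 = (j - key) % n
    have hi0nn : 0 ≤ ((j : Int) - key) % n := Int.emod_nonneg _ (by omega)
    have hi0lt : ((j : Int) - key) % n < n := Int.emod_lt_of_pos _ hn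
    set k0 : Nat := (((j : Int) - key) % n).toNat with hk0
    have hk0lt : k0 < cs.length := by omega
    have hpmem : ((k0 : Int), cs[k0]) ∈ PySem.List.enumerate cs 0 := by
      rw [PySem.List.mem_enumerate_iff]
      exact ⟨k0, hk0lt, by simp⟩
    have hgp : ((((k0 : Int)) + key) % n).toNat = j := by
      have hcast : (k0 : Int) = ((j : Int) - key) % n := by omega
      rw [hcast, Int.emod_add_emod]
      have hjj : (j : Int) - key + key = (j : Int) := by ring
      rw [hjj, Int.emod_eq_of_lt (by omega) (by omega)]
      omega
    have hk0rot : k0 = (j + s') % cs.length := by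
      have h1 : ((j + s' : Nat) : Int) % n = ((j : Int) - key) % n := by
        have hscast : ((s' : Nat) : Int) = (-key) % n := by omega
        push_cast
        rw [hscast, add_comm ((j : Int)) ((-key) % n), Int.emod_add_emod]
        congr 1
        ring
      have h2 : (((j + s') % cs.length : Nat) : Int) = ((j + s' : Nat) : Int) % n := by
        rw [hndef]
        exact_mod_cast Int.natCast_emod (j + s') cs.length
      omega
    have hL : ((PySem.List.enumerate cs 0).foldl
        (fun t ic => t.set (((ic.1 + key) % n).toNat) (String.ofList [ic.2]))
        ((List.range cs.length).map (fun _ => "")))[j]? = some (String.ofList [cs[k0]]) := by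
      have hmain := foldl_set_get_mem (fun ic : Int × Char => ((ic.1 + key) % n).toNat)
        (fun ic : Int × Char => String.ofList [ic.2])
        (PySem.List.enumerate cs 0)
        ((k0 : Int), cs[k0]) hpmem hnd
        ((List.range cs.length).map (fun _ => ""))
        (by simp only [List.length_map, List.length_range]; rw [hgp]; exact hj)
      simpa only [hgp] using hmain
    rw [hL, List.getElem?_map, rot_getElem? cs s' j (by omega) hj, ← hk0rot,
      List.getElem?_eq_getElem hk0lt]
    rfl
  · -- out of range on both sides
    rw [List.getElem?_eq_none, List.getElem?_eq_none]
    · simp only [List.length_map, List.length_append, List.length_drop, List.length_take]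
      omega
    · rw [foldl_set_length]
      simp only [List.length_map, List.length_range]
      omega

theorem foldl_append_singletons (L : List Char) (a : String) :
    (L.map (fun c => String.ofList [c])).foldl (fun acc st => acc ++ st) a
      = a ++ String.ofList L := by
  induction L generalizing a with
  | nil => simp
  | cons c L ih =>
      rw [List.map_cons, List.foldl_cons, ih]
      apply String.toList_inj.mp
      simp

-- ===== VERDICT (by name: the statement is the Claim_ definition above) =====
theorem change_encrypt_spec : Claim_equal_change_encrypt := by
  unfold Claim_equal_change_encrypt Spec_change_encrypt
  intro answer key _
  by_cases h : answer = ""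
  · subst h
    rfl
  · have hcs : answer.toList ≠ [] := by
      intro hnil
      exact h (String.toList_inj.mp (by simp [hnil]))
    have hn : 0 < (answer.toList.length : Int) := by
      have := List.length_pos_iff.mpr hcs
      exact_mod_cast this
    unfold change_encrypt change_encrypt_alt
    simp only [if_neg h]
    rw [temp_eq answer.toList key hcs, foldl_append_singletons]
    apply String.toList_inj.mp
    have hsnn : 0 ≤ (-key) % (answer.toList.length : Int) := Int.emod_nonneg _ (by omega)
    simp only [String.toList_append, PySem.Str.toList_slice, PySem.Chars.slice,
      PySem.Int.mod_eq_emod_of_pos hn, PySem.List.slice_from _ hsnn,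
      PySem.List.slice_to _ hsnn, String.toList_ofList, String.toList_empty,
      List.nil_append]
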